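-- pv_equiv track=rewrite | github.com/Jazyki-Mira/langworld_db_data | langworld_db_data/removers/feature_remover.py | _remove_multiple_matching_rows_and_return_range_of_their_line_numbers
-- ===== SOURCE A (Python) =====
-- def _remove_multiple_matching_rows_and_return_range_of_their_line_numbers(
--     match_content: str,
--     rows: list[dict[str, str]],
-- ) -> tuple[list[dict[str, str]], tuple[int]]:
--     """
--     Remove more than one row from given rows (typically from listed values inventory)
--     which contain specified ID. Return rows without the target rows and the tuple line
--     numbers of the first and the last removed rows.
--
--     For example, if asked to remove all A-2 values from the list of A-1-1, A-2-1, A-2-2, A-2-3 and A-3-1,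
--     return the list of A-1-1 and A-3-1 and line numbers 1 (initial) and 3 (final).
--     match_content is the sequence to search in the given column in the given rows.
--     For removing exactly one row, please use _remove_one_row_and_return_its_line_number.
--     """
--     # This one is designed specifically for FeatureRemover because ListedValueRemover has only to remove one row at a time
--
--     line_numbers_of_removed_rows = []
--
--     for i, row in enumerate(rows):
--         if row["feature_id"] == match_content:
--             line_numbers_of_removed_rows.append(i)
--
--     if len(line_numbers_of_removed_rows) == 0:
--         raise ValueError(
--             f"Rows with given properties not found. Perhaps match_content is invalid: {match_content}"
--         )
--
--     first_line_number = line_numbers_of_removed_rows[0]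
--     last_line_number = line_numbers_of_removed_rows[-1]
--
--     return (
--         rows[:first_line_number] + rows[last_line_number + 1 :],
--         (first_line_number, last_line_number),
--     )
-- ===== SOURCE B (Python) =====
-- def _remove_multiple_matching_rows_and_return_range_of_their_line_numbers(
--     match_content,
--     rows,
-- ):
--     first_line_number = None
--     for i, row in enumerate(rows):
--         if row["feature_id"] == match_content:
--             first_line_number = i
--             break
--
--     if first_line_number is None:
--         raise ValueError(
--             f"Rows with given properties not found. Perhaps match_content is invalid: {match_content}"
--         )
--
--     last_line_number = first_line_number
--     for k, row in enumerate(reversed(rows)):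
--         if row["feature_id"] == match_content:
--             last_line_number = len(rows) - 1 - k
--             break
--
--     return (
--         rows[:first_line_number] + rows[last_line_number + 1:],
--         (first_line_number, last_line_number),
--     )
-- ===== Notes on version B (the rewrite author's own statement) =====
-- stated objective: alternative
-- what changed: A builds the full list of matching indices in one pass and takes its first/last element; B does two early-exit boundary scans (forward for the first match, backward over reversed rows for the last) and never materialises the index list.
import Mathlib
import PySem

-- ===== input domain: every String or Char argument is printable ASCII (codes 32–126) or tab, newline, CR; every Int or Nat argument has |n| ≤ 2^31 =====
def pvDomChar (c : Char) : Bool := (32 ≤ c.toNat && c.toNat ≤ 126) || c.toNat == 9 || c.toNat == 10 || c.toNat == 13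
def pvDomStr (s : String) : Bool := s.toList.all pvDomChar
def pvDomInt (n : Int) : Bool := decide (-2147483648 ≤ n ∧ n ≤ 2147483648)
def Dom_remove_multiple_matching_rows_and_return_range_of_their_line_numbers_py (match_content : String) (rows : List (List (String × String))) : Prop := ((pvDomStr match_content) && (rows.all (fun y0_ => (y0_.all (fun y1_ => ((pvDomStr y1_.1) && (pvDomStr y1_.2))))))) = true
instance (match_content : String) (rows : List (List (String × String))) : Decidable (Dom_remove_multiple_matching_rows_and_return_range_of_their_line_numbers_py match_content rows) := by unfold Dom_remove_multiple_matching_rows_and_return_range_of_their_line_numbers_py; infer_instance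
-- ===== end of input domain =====

-- B replaces A's full pass that collects every matching index with two early-exit boundary
-- scans (forward for the first match, backward over reversed(rows) for the last); same
-- contiguous block rows[:first]+rows[last+1:] and the same (first, last) pair are returned.

-- row["feature_id"] on the Python dict built from the association list
def pvRowFid (row : List (String × String)) : Option String :=
  PySem.Dict.get? (PySem.Dict.ofList row) "feature_id"

-- ===== PORT A =====
def remove_multiple_matching_rows_and_return_range_of_their_line_numbers_py (match_content : String) (rows : List (List (String × String))) : (List (List (String × String))) × (Int × Int) :=
  -- for i, row in enumerate(rows): if row["feature_id"] == match_content: append(i)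
  let line_numbers_of_removed_rows : List Int :=
    (PySem.List.enumerate rows 0).foldl
      (fun acc p => if pvRowFid p.2 == some match_content then acc ++ [p.1] else acc) []
  if line_numbers_of_removed_rows.length = 0 then
    ([], (0, 0))  -- Python raises ValueError here; excluded by Pre_
  else
    let first_line_number := (PySem.List.pyGet? line_numbers_of_removed_rows 0).getD 0
    let last_line_number := (PySem.List.pyGet? line_numbers_of_removed_rows (-1)).getD 0
    (PySem.List.slice rows none (some first_line_number) ++
       PySem.List.slice rows (some (last_line_number + 1)) none,
     (first_line_number, last_line_number))

-- ===== PORT B =====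
-- the forward scan with break: first index i ≥ s (counting from s) whose row matches
def pvFindMatch (match_content : String) : List (List (String × String)) → Int → Option Int
  | [], _ => none
  | row :: rest, i =>
      if pvRowFid row == some match_content then some i
      else pvFindMatch match_content rest (i + 1)

def remove_multiple_matching_rows_and_return_range_of_their_line_numbers_py_alt (match_content : String) (rows : List (List (String × String))) : (List (List (String × String))) × (Int × Int) :=
  match pvFindMatch match_content rows 0 with
  | none => ([], (0, 0))  -- Python raises ValueError here; excluded by Pre_
  | some first_line_number =>
      let last_line_number :=
        match pvFindMatch match_content rows.reverse 0 with
        | none => first_line_number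
        | some k => (rows.length : Int) - 1 - k
      (PySem.List.slice rows none (some first_line_number) ++
         PySem.List.slice rows (some (last_line_number + 1)) none,
       (first_line_number, last_line_number))

-- ===== PRECONDITION & SPEC =====
-- Pre_ excludes only inputs where A raises: a row without the "feature_id" key (KeyError)
-- or no row matching match_content (ValueError).
def Pre_remove_multiple_matching_rows_and_return_range_of_their_line_numbers_py (match_content : String) (rows : List (List (String × String))) : Prop :=
  rows.all (fun r => (PySem.Dict.ofList r).contains "feature_id") = true ∧
  rows.any (fun r => PySem.Dict.get? (PySem.Dict.ofList r) "feature_id" == some match_content) = true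
instance (match_content : String) (rows : List (List (String × String))) : Decidable (Pre_remove_multiple_matching_rows_and_return_range_of_their_line_numbers_py match_content rows) := by unfold Pre_remove_multiple_matching_rows_and_return_range_of_their_line_numbers_py; infer_instance

def pvWitness_remove_multiple_matching_rows_and_return_range_of_their_line_numbers_py : String × (List (List (String × String))) :=
  ("A-2", [[("feature_id", "A-1")], [("feature_id", "A-2")], [("feature_id", "A-2")], [("feature_id", "A-3")]])

def Spec_remove_multiple_matching_rows_and_return_range_of_their_line_numbers_py (match_content : String) (rows : List (List (String × String))) (out : (List (List (String × String))) × (Int × Int)) : Prop := out = remove_multiple_matching_rows_and_return_range_of_their_line_numbers_py_alt match_content rows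
instance (match_content : String) (rows : List (List (String × String))) (out : (List (List (String × String))) × (Int × Int)) : Decidable (Spec_remove_multiple_matching_rows_and_return_range_of_their_line_numbers_py match_content rows out) := by unfold Spec_remove_multiple_matching_rows_and_return_range_of_their_line_numbers_py; infer_instance

-- ===== CLAIM (what is proved, stated in full; the proofs are below) =====
def Claim_equal_remove_multiple_matching_rows_and_return_range_of_their_line_numbers_py : Prop := ∀ (match_content : String) (rows : List (List (String × String))), Dom_remove_multiple_matching_rows_and_return_range_of_their_line_numbers_py match_content rows → Pre_remove_multiple_matching_rows_and_return_range_of_their_line_numbers_py match_content rows → Spec_remove_multiple_matching_rows_and_return_range_of_their_line_numbers_py match_content rows (remove_multiple_matching_rows_and_return_range_of_their_line_numbers_py match_content rows)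

-- ===== LEMMAS AND PROOFS =====

-- the list of matching line numbers, starting the count at s
def pvMatchIdx (mc : String) (rows : List (List (String × String))) (s : Int) : List Int :=
  ((PySem.List.enumerate rows s).filter (fun p => pvRowFid p.2 == some mc)).map (·.1)

lemma pvMatchIdx_nil (mc : String) (s : Int) : pvMatchIdx mc [] s = [] := rfl

lemma pvMatchIdx_cons (mc : String) (r : List (String × String)) (rows : List (List (String × String))) (s : Int) :
    pvMatchIdx mc (r :: rows) s =
      (if pvRowFid r == some mc then [s] else []) ++ pvMatchIdx mc rows (s + 1) := by
  by_cases h : pvRowFid r = some mc <;>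
    simp [pvMatchIdx, PySem.List.enumerate_cons, h]

lemma pvMatchIdx_shift (mc : String) (rows : List (List (String × String))) (s t : Int) :
    pvMatchIdx mc rows (s + t) = (pvMatchIdx mc rows s).map (· + t) := by
  induction rows generalizing s with
  | nil => simp [pvMatchIdx_nil]
  | cons r rows ih =>
      simp only [pvMatchIdx_cons]
      rw [show s + t + 1 = (s + 1) + t by ring, ih]
      split_ifs <;> simp

lemma pvFindMatch_eq_head (mc : String) (rows : List (List (String × String))) (s : Int) :
    pvFindMatch mc rows s = (pvMatchIdx mc rows s).head? := by
  induction rows generalizing s with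
  | nil => simp [pvFindMatch, pvMatchIdx_nil]
  | cons r rows ih =>
      simp only [pvFindMatch, pvMatchIdx_cons]
      split_ifs with h <;> simp [ih]

lemma pvMatchIdx_append (mc : String) (xs ys : List (List (String × String))) (s : Int) :
    pvMatchIdx mc (xs ++ ys) s = pvMatchIdx mc xs s ++ pvMatchIdx mc ys (s + xs.length) := by
  simp [pvMatchIdx, PySem.List.enumerate_append]

lemma pvMatchIdx_reverse (mc : String) (rows : List (List (String × String))) :
    pvMatchIdx mc rows.reverse 0 =
      (pvMatchIdx mc rows 0).reverse.map (fun i => (rows.length : Int) - 1 - i) := by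
  induction rows with
  | nil => simp [pvMatchIdx_nil]
  | cons r rows ih =>
      have hsh : pvMatchIdx mc rows (0 + 1) = (pvMatchIdx mc rows 0).map (· + 1) := by
        simpa using pvMatchIdx_shift mc rows 0 1
      rw [List.reverse_cons, pvMatchIdx_append, ih, pvMatchIdx_cons, pvMatchIdx_cons,
        pvMatchIdx_nil, hsh]
      by_cases h : pvRowFid r = some mc <;>
        · simp [h, List.map_reverse, Function.comp]
          intro a _
          ring

lemma pvFoldl_idxs (mc : String) (rows : List (List (String × String))) :
    (PySem.List.enumerate rows 0).foldl
      (fun acc p => if pvRowFid p.2 == some mc then acc ++ [p.1] else acc) [] =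
      pvMatchIdx mc rows 0 := by
  simpa [pvMatchIdx] using
    PySem.List.foldl_append_if (fun p : Int × List (String × String) => pvRowFid p.2 == some mc)
      (fun p => p.1) (PySem.List.enumerate rows 0) []

lemma pvMatchIdx_ne_nil (mc : String) (rows : List (List (String × String)))
    (h : rows.any (fun r => PySem.Dict.get? (PySem.Dict.ofList r) "feature_id" == some mc) = true) :
    pvMatchIdx mc rows 0 ≠ [] := by
  induction rows with
  | nil => simp at h
  | cons r rows ih =>
      rw [pvMatchIdx_cons]
      simp only [List.any_cons, Bool.or_eq_true] at h
      rcases h with h | h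
      · simp [pvRowFid, h]
      · intro hc
        rcases List.append_eq_nil_iff.mp hc with ⟨_, h2⟩
        have : pvMatchIdx mc rows (0 + 1) = (pvMatchIdx mc rows 0).map (· + 1) := by
          simpa using pvMatchIdx_shift mc rows 0 1
        rw [this] at h2
        exact ih h (List.map_eq_nil_iff.mp h2)

-- ===== VERDICT (by name: the statement is the Claim_ definition above) =====
theorem remove_multiple_matching_rows_and_return_range_of_their_line_numbers_py_spec : Claim_equal_remove_multiple_matching_rows_and_return_range_of_their_line_numbers_py := by
  intro mc rows _ hpre
  rcases hpre with ⟨_, hany⟩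
  unfold Spec_remove_multiple_matching_rows_and_return_range_of_their_line_numbers_py
  unfold remove_multiple_matching_rows_and_return_range_of_their_line_numbers_py
  unfold remove_multiple_matching_rows_and_return_range_of_their_line_numbers_py_alt
  rw [pvFoldl_idxs]
  have hne := pvMatchIdx_ne_nil mc rows hany
  rw [pvFindMatch_eq_head, pvFindMatch_eq_head, pvMatchIdx_reverse]
  obtain ⟨f, rest, hM⟩ := List.exists_cons_of_ne_nil hne
  rcases List.eq_nil_or_concat (f :: rest) with hL | ⟨init, l, hL⟩
  · simp at hL
  rw [hM]
  have hget2 : PySem.List.pyGet? (f :: rest) (-1) = some l := by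
    rw [hL, PySem.List.pyGet?_neg_one]
    simp
  have hrev : (f :: rest).reverse = l :: init.reverse := by rw [hL]; simp
  simp [hget2, hrev]
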